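-- pv_equiv track=rewrite | github.com/NurihsanFebrianto/Python | UAS/Soal2.py | min_operations_to_sort
-- ===== SOURCE A (Python) =====
-- def min_operations_to_sort(N, A, B):
--     operations = 0
--     A = list(A)
--     B = list(B)
--
--     i = 0
--     while i < N:
--         if A[i] > B[i]:
--             j = i
--             while j < N and A[j] > B[j]:
--                 j += 1
--             A[i:j], B[i:j] = B[i:j], A[i:j]
--             operations += 1
--         i += 1
--
--     return operations
-- ===== SOURCE B (Python) =====
-- def min_operations_to_sort(N, A, B):
--     A = list(A)
--     B = list(B)
--     operations = 0
--     in_run = False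
--     for i in range(N):
--         cur = A[i] > B[i]
--         if cur and not in_run:
--             operations += 1
--         in_run = cur
--     return operations
-- ===== Notes on version B (the rewrite author's own statement) =====
-- stated objective: simpler
-- what changed: Replaces the inner while-loop and the slice-swap mutation of both lists by a single flat pass that counts the starts of maximal runs where A[i] > B[i], keeping only a counter and an in-run flag.
import Mathlib
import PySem

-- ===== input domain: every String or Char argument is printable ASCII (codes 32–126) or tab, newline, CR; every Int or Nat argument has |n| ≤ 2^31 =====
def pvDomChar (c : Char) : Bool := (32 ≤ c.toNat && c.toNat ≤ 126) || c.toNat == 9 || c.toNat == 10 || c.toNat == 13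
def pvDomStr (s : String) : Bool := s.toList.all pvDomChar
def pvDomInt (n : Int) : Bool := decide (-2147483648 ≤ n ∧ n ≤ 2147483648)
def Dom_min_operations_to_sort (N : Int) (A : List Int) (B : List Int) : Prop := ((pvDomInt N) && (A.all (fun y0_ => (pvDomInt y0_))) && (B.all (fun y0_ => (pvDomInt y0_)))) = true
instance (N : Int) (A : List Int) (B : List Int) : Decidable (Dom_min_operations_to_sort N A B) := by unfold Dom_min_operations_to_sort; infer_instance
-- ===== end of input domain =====

-- B replaces A's mutating outer/inner while-loops and slice swaps by one flat pass counting run starts (simpler decomposition).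

-- ===== PORT A =====
-- inner loop: 'while j < N and A[j] > B[j]: j += 1'
def pyA_findJ (N : Int) (A : List Int) (B : List Int) (j : Int) : Int :=
  if _h : j < N ∧ PySem.List.pyGetD A j 0 > PySem.List.pyGetD B j 0 then
    pyA_findJ N A B (j + 1)
  else j
termination_by (N - j).toNat
decreasing_by omega

-- outer loop: 'while i < N', carrying the (mutated) lists and the operation count
def pyA_loop (N : Int) (A : List Int) (B : List Int) (i : Int) (operations : Int) : Int :=
  if _h : i < N then
    if PySem.List.pyGetD A i 0 > PySem.List.pyGetD B i 0 then
      let j := pyA_findJ N A B i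
      -- A[i:j], B[i:j] = B[i:j], A[i:j]
      let sA := PySem.List.slice A (some i) (some j)
      let sB := PySem.List.slice B (some i) (some j)
      let A' := PySem.List.slice A none (some i) ++ sB ++ PySem.List.slice A (some j) none
      let B' := PySem.List.slice B none (some i) ++ sA ++ PySem.List.slice B (some j) none
      pyA_loop N A' B' (i + 1) (operations + 1)
    else pyA_loop N A B (i + 1) operations
  else operations
termination_by (N - i).toNat
decreasing_by all_goals omega

def min_operations_to_sort (N : Int) (A : List Int) (B : List Int) : Int :=
  pyA_loop N A B 0 0

-- ===== PORT B =====
def min_operations_to_sort_alt (N : Int) (A : List Int) (B : List Int) : Int :=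
  ((PySem.List.pyRange 0 N 1).foldl
    (fun (st : Int × Bool) i =>
      let cur : Bool := decide (PySem.List.pyGetD A i 0 > PySem.List.pyGetD B i 0)
      ((if cur && !st.2 then st.1 + 1 else st.1), cur))
    (0, false)).1

-- ===== PRECONDITION & SPEC =====
-- Pre_ excludes exactly the inputs on which Python A raises IndexError (N exceeding a list's length).
def Pre_min_operations_to_sort (N : Int) (A : List Int) (B : List Int) : Prop :=
  N ≤ (A.length : Int) ∧ N ≤ (B.length : Int)
instance (N : Int) (A : List Int) (B : List Int) : Decidable (Pre_min_operations_to_sort N A B) := by unfold Pre_min_operations_to_sort; infer_instance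
def pvWitness_min_operations_to_sort : Int × List Int × List Int := (3, [3, 1, 2], [1, 2, 2])

def Spec_min_operations_to_sort (N : Int) (A : List Int) (B : List Int) (out : Int) : Prop := out = min_operations_to_sort_alt N A B
instance (N : Int) (A : List Int) (B : List Int) (out : Int) : Decidable (Spec_min_operations_to_sort N A B out) := by unfold Spec_min_operations_to_sort; infer_instance

-- ===== CLAIM (what is proved, stated in full; the proofs are below) =====
def Claim_equal_min_operations_to_sort : Prop := ∀ (N : Int) (A : List Int) (B : List Int), Dom_min_operations_to_sort N A B → Pre_min_operations_to_sort N A B → Spec_min_operations_to_sort N A B (min_operations_to_sort N A B)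

-- ===== LEMMAS AND PROOFS =====

-- the per-index comparison both programs branch on
def pvG (A B : List Int) (k : Int) : Bool := decide (PySem.List.pyGetD A k 0 > PySem.List.pyGetD B k 0)

-- reference count: starts of maximal true-runs of g on [i, N), with incoming flag prev
def pvRuns (N : Int) (g : Int → Bool) (i : Int) (prev : Bool) : Int :=
  if _h : i < N then
    (if g i && !prev then 1 else 0) + pvRuns N g (i + 1) (g i)
  else 0
termination_by (N - i).toNat
decreasing_by omega

lemma pvRuns_neg (N : Int) (g : Int → Bool) (i : Int) (prev : Bool) (h : ¬ i < N) :
    pvRuns N g i prev = 0 := by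
  rw [pvRuns]; simp [h]

lemma pvRuns_pos (N : Int) (g : Int → Bool) (i : Int) (prev : Bool) (h : i < N) :
    pvRuns N g i prev = (if g i && !prev then 1 else 0) + pvRuns N g (i + 1) (g i) := by
  rw [pvRuns]; simp [h]

lemma pvRuns_congr (N : Int) (g g' : Int → Bool) (i : Int) (prev : Bool)
    (h : ∀ k, i ≤ k → k < N → g k = g' k) : pvRuns N g i prev = pvRuns N g' i prev := by
  by_cases hi : i < N
  · rw [pvRuns_pos N g i prev hi, pvRuns_pos N g' i prev hi, h i le_rfl hi,
        pvRuns_congr N g g' (i+1) (g' i) (fun k hk hkN => h k (by omega) hkN)]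
  · rw [pvRuns_neg N g i prev hi, pvRuns_neg N g' i prev hi]
termination_by (N - i).toNat
decreasing_by omega

lemma findJ_spec (N : Int) (A B : List Int) (i : Int) :
    i ≤ pyA_findJ N A B i ∧ (i ≤ N → pyA_findJ N A B i ≤ N) ∧
    (∀ k, i ≤ k → k < pyA_findJ N A B i → k < N ∧ pvG A B k = true) ∧
    ¬ (pyA_findJ N A B i < N ∧ pvG A B (pyA_findJ N A B i) = true) := by
  rw [pyA_findJ]
  by_cases h : i < N ∧ PySem.List.pyGetD A i 0 > PySem.List.pyGetD B i 0
  · rw [dif_pos h]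
    obtain ⟨h1, h2, h3, h4⟩ := findJ_spec N A B (i + 1)
    refine ⟨by omega, fun _ => h2 (by omega), ?_, h4⟩
    intro k hk hk2
    rcases eq_or_lt_of_le hk with rfl | hlt
    · exact ⟨h.1, by simp only [pvG, decide_eq_true_eq]; exact h.2⟩
    · exact h3 k (by omega) hk2
  · rw [dif_neg h]
    refine ⟨le_rfl, fun hiN => hiN, fun k hk hk2 => absurd (lt_of_le_of_lt hk hk2) (lt_irrefl _), ?_⟩
    intro ⟨hlt, hg⟩
    simp only [pvG, decide_eq_true_eq] at hg
    exact h ⟨hlt, hg⟩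
termination_by (N - i).toNat
decreasing_by omega

-- element view of the Python slice-swap splice
lemma splice_getD (A B : List Int) (i j : Int)
    (h0 : 0 ≤ i) (hij : i ≤ j) (hA : j ≤ (A.length : Int)) (hB : j ≤ (B.length : Int))
    (k : Int) (hk : 0 ≤ k) :
    PySem.List.pyGetD (PySem.List.slice A none (some i) ++ PySem.List.slice B (some i) (some j) ++ PySem.List.slice A (some j) none) k 0
      = if i ≤ k ∧ k < j then PySem.List.pyGetD B k 0 else PySem.List.pyGetD A k 0 := by
  rw [PySem.List.slice_to A h0,
      PySem.List.slice_of_nonneg B h0 (le_trans h0 hij) (le_trans hij hB) hB,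
      PySem.List.slice_from A (le_trans h0 hij),
      PySem.List.pyGetD_of_nonneg _ 0 hk, PySem.List.pyGetD_of_nonneg _ 0 hk,
      PySem.List.pyGetD_of_nonneg _ 0 hk]
  have hXlen : (A.take i.toNat).length = i.toNat := by
    simp only [List.length_take]; omega
  have hYlen : ((List.drop i.toNat B).take (j.toNat - i.toNat)).length = j.toNat - i.toNat := by
    simp only [List.length_take, List.length_drop]; omega
  simp only [List.getD_eq_getElem?_getD]
  by_cases h1 : k < i
  · rw [if_neg (by omega),
        List.getElem?_append_left (by rw [List.length_append, hXlen, hYlen]; omega),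
        List.getElem?_append_left (by rw [hXlen]; omega),
        List.getElem?_take_of_lt (by omega)]
  · by_cases h2 : k < j
    · rw [if_pos ⟨by omega, h2⟩,
          List.getElem?_append_left (by rw [List.length_append, hXlen, hYlen]; omega),
          List.getElem?_append_right (by rw [hXlen]; omega), hXlen,
          List.getElem?_take_of_lt (by omega), List.getElem?_drop,
          show i.toNat + (k.toNat - i.toNat) = k.toNat from by omega]
    · rw [if_neg (by omega),
          List.getElem?_append_right (by rw [List.length_append, hXlen, hYlen]; omega),
          List.length_append, hXlen, hYlen, List.getElem?_drop,
          show j.toNat + (k.toNat - (i.toNat + (j.toNat - i.toNat))) = k.toNat from by omega]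

-- the comparison function after the slice swap: false on [i, j), unchanged elsewhere (for 0 ≤ k)
lemma pvG_swap (A B : List Int) (i j : Int)
    (h0 : 0 ≤ i) (hij : i ≤ j) (hA : j ≤ (A.length : Int)) (hB : j ≤ (B.length : Int))
    (hrun : ∀ k, i ≤ k → k < j → pvG A B k = true)
    (k : Int) (hk : 0 ≤ k) :
    pvG (PySem.List.slice A none (some i) ++ PySem.List.slice B (some i) (some j) ++ PySem.List.slice A (some j) none)
        (PySem.List.slice B none (some i) ++ PySem.List.slice A (some i) (some j) ++ PySem.List.slice B (some j) none)
        k = if i ≤ k ∧ k < j then false else pvG A B k := by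
  have e1 := splice_getD A B i j h0 hij hA hB k hk
  have e2 := splice_getD B A i j h0 hij hB hA k hk
  simp only [pvG] at *
  rw [e1, e2]
  by_cases hc : i ≤ k ∧ k < j
  · have := hrun k hc.1 hc.2
    simp only [decide_eq_true_eq] at this
    simp only [if_pos hc]
    simp only [decide_eq_false_iff_not]
    omega
  · simp [hc]

-- lengths are preserved by the splice
lemma splice_length (A B : List Int) (i j : Int)
    (h0 : 0 ≤ i) (hij : i ≤ j) (hA : j ≤ (A.length : Int)) (hB : j ≤ (B.length : Int)) :
    (PySem.List.slice A none (some i) ++ PySem.List.slice B (some i) (some j) ++ PySem.List.slice A (some j) none).length = A.length := by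
  rw [PySem.List.slice_to A h0,
      PySem.List.slice_of_nonneg B h0 (le_trans h0 hij) (le_trans hij hB) hB,
      PySem.List.slice_from A (le_trans h0 hij)]
  simp only [List.length_append, List.length_take, List.length_drop]
  omega

-- a finished run counted with prev = true equals the swapped (all-false) run counted with prev = false
lemma pvRuns_run_shift (N : Int) (g g' : Int → Bool) (j : Int) (hjN : j ≤ N)
    (hgj : j < N → g j = false)
    (htail : ∀ m, j ≤ m → m < N → g' m = g m) :
    ∀ k, k ≤ j → (∀ m, k ≤ m → m < j → g m = true ∧ g' m = false) →
      pvRuns N g k true = pvRuns N g' k false := by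
  intro k hkj hmid
  by_cases hlt : k < j
  · have hkN : k < N := by omega
    obtain ⟨hgk, hg'k⟩ := hmid k le_rfl hlt
    rw [pvRuns_pos N g k true hkN, pvRuns_pos N g' k false hkN, hgk, hg'k]
    simp only [Bool.not_true, Bool.and_false, Bool.false_and, Bool.false_eq_true, if_false,
      Int.zero_add]
    exact pvRuns_run_shift N g g' j hjN hgj htail (k+1) (by omega)
      (fun m hm hm2 => hmid m (by omega) hm2)
  · have hkj' : k = j := by omega
    subst hkj'
    by_cases hN : k < N
    · have hgj' := hgj hN
      have hg'j : g' k = g k := htail k le_rfl hN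
      rw [pvRuns_pos N g k true hN, pvRuns_pos N g' k false hN, hgj', hg'j, hgj']
      simp only [Bool.false_and, Bool.false_eq_true, if_false, Int.zero_add]
      exact pvRuns_congr N g g' (k+1) false
        (fun m hm hm2 => (htail m (by omega) hm2).symm)
    · rw [pvRuns_neg N g k true hN, pvRuns_neg N g' k false hN]
termination_by k => (j - k).toNat
decreasing_by omega

-- the outer loop of A counts run starts
lemma loopA_eq (N : Int) : ∀ (A B : List Int) (i ops : Int),
    N ≤ (A.length : Int) → N ≤ (B.length : Int) → 0 ≤ i →
    pyA_loop N A B i ops = ops + pvRuns N (pvG A B) i false := by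
  intro A B i ops hA hB hi
  by_cases hiN : i < N
  · rw [pyA_loop, dif_pos hiN, pvRuns_pos N (pvG A B) i false hiN]
    by_cases hg : PySem.List.pyGetD A i 0 > PySem.List.pyGetD B i 0
    · rw [if_pos hg]
      obtain ⟨hj1, hj2, hj3, hj4⟩ := findJ_spec N A B i
      set j := pyA_findJ N A B i with hjdef
      have hjN : j ≤ N := hj2 (by omega)
      have hjA : j ≤ (A.length : Int) := le_trans hjN hA
      have hjB : j ≤ (B.length : Int) := le_trans hjN hB
      have hrun : ∀ k, i ≤ k → k < j → pvG A B k = true := fun k hk hk2 => (hj3 k hk hk2).2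
      set A' := PySem.List.slice A none (some i) ++ PySem.List.slice B (some i) (some j) ++ PySem.List.slice A (some j) none with hA'
      set B' := PySem.List.slice B none (some i) ++ PySem.List.slice A (some i) (some j) ++ PySem.List.slice B (some j) none with hB'
      have hlenA' : N ≤ (A'.length : Int) := by
        rw [hA', splice_length A B i j hi hj1 hjA hjB]; exact hA
      have hlenB' : N ≤ (B'.length : Int) := by
        rw [hB', splice_length B A i j hi hj1 hjB hjA]; exact hB
      rw [loopA_eq N A' B' (i+1) (ops+1) hlenA' hlenB' (by omega)]
      have hgi : pvG A B i = true := by simp only [pvG, decide_eq_true_eq]; exact hg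
      have hij' : i < j := by
        rcases eq_or_lt_of_le hj1 with heq | h
        · exact absurd ⟨by omega, by rw [← heq]; exact hgi⟩ hj4
        · exact h
      have hswap : ∀ k, 0 ≤ k → pvG A' B' k = if i ≤ k ∧ k < j then false else pvG A B k :=
        fun k hk => pvG_swap A B i j hi hj1 hjA hjB hrun k hk
      have hgjfalse : j < N → pvG A B j = false := by
        intro hjn
        by_cases hh : pvG A B j = true
        · exact absurd ⟨hjn, hh⟩ hj4
        · simpa using hh
      have hshift : pvRuns N (pvG A B) (i+1) true = pvRuns N (pvG A' B') (i+1) false := by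
        apply pvRuns_run_shift N (pvG A B) (pvG A' B') j hjN hgjfalse
        · intro m hm hm2
          rw [hswap m (by omega)]
          simp [show ¬ (i ≤ m ∧ m < j) by omega]
        · omega
        · intro m hm hm2
          exact ⟨hrun m (by omega) hm2,
            by rw [hswap m (by omega)]; simp [show i ≤ m ∧ m < j from ⟨by omega, hm2⟩]⟩
      rw [hgi, hshift]
      simp only [Bool.not_false, Bool.and_true, if_true]
      ring
    · rw [if_neg hg, loopA_eq N A B (i+1) ops hA hB (by omega)]
      have hgi : pvG A B i = false := by
        simp only [pvG, decide_eq_false_iff_not]; exact hg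
      rw [hgi]
      simp
  · rw [pyA_loop, dif_neg hiN, pvRuns_neg N (pvG A B) i false hiN]
    omega
termination_by A B i => (N - i).toNat
decreasing_by all_goals omega

-- the flat pass of B counts run starts
lemma foldB_eq (N : Int) (A B : List Int) : ∀ (i c : Int) (prev : Bool),
    ((PySem.List.pyRange i N 1).foldl
      (fun (st : Int × Bool) k =>
        ((if decide (PySem.List.pyGetD A k 0 > PySem.List.pyGetD B k 0) && !st.2 then st.1 + 1 else st.1),
         decide (PySem.List.pyGetD A k 0 > PySem.List.pyGetD B k 0)))
      (c, prev)).1 = c + pvRuns N (pvG A B) i prev := by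
  intro i c prev
  by_cases hiN : i < N
  · rw [PySem.List.pyRange_one_cons hiN, List.foldl_cons,
      foldB_eq N A B (i+1) _ _, pvRuns_pos N (pvG A B) i prev hiN]
    simp only [pvG]
    by_cases hb : (decide (PySem.List.pyGetD A i 0 > PySem.List.pyGetD B i 0) && !prev) = true
    · rw [if_pos hb, if_pos hb]
      ring
    · rw [if_neg hb, if_neg hb]
      ring
  · rw [PySem.List.pyRange_one_eq_nil (by omega), List.foldl_nil,
      pvRuns_neg N (pvG A B) i prev hiN]
    ring
termination_by i => (N - i).toNat
decreasing_by omega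

-- ===== VERDICT (by name: the statement is the Claim_ definition above) =====
theorem min_operations_to_sort_spec : Claim_equal_min_operations_to_sort := by
  intro N A B _hDom hPre
  unfold Spec_min_operations_to_sort min_operations_to_sort min_operations_to_sort_alt
  rw [loopA_eq N A B 0 0 hPre.1 hPre.2 le_rfl]
  rw [show (fun (st : Int × Bool) i =>
      let cur : Bool := decide (PySem.List.pyGetD A i 0 > PySem.List.pyGetD B i 0)
      ((if cur && !st.2 then st.1 + 1 else st.1), cur))
    = (fun (st : Int × Bool) k =>
      ((if decide (PySem.List.pyGetD A k 0 > PySem.List.pyGetD B k 0) && !st.2 then st.1 + 1 else st.1),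
       decide (PySem.List.pyGetD A k 0 > PySem.List.pyGetD B k 0))) from rfl]
  rw [foldB_eq N A B 0 0 false]
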